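-- pv_equiv track=rewrite | github.com/mishotek/information-theory | Assignment 1/PrefCode.py | build_code
-- ===== SOURCE A (Python) =====
-- def decimal_to_binary(dec):
--     return "{0:b}".format(dec)
--
-- def binary_to_decimal(binary):
--     length = len(binary)
--     decimal = 0
--
--     for i in range(length):
--         index = length - 1 - i
--
--         if binary[index] == '1':
--             decimal = decimal + 2 ** i
--
--     return decimal
--
-- def increment_binary(binary):
--     return decimal_to_binary(binary_to_decimal(binary) + 1)
--
-- def build_word(code_word, length):
--     while len(code_word) < length:
--         code_word = code_word + '0'
--     return code_word
--
-- def increment_code(prev_code):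
--     if '1' not in prev_code:
--         return prev_code[:len(prev_code) - 1] + '1'
--
--     binary = increment_binary(prev_code[prev_code.index('1'):])
--
--     while len(binary) < len(prev_code):
--         binary = '0' + binary
--
--     return binary
--
-- def build_code(numbers):
--     res = []
--
--     sorted_numbers = sorted(numbers)
--     curr_code = '0'
--
--     for length in sorted_numbers:
--         code = build_word(curr_code, length)
--         res.append(code)
--         curr_code = increment_code(code)
--
--     return res
-- ===== SOURCE B (Python) =====
-- def build_code(numbers):
--     # Integer counter instead of a string-based binary counter: value/width replace
--     # the char-padding and string-increment helpers.
--     res = []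
--     value, width = 0, 1
--     for length in sorted(numbers):
--         if width < length:
--             value <<= length - width
--             width = length
--         res.append(format(value, '0{}b'.format(width)))
--         value += 1
--         if value.bit_length() > width:
--             width = value.bit_length()
--     return res
-- ===== Notes on version B (the rewrite author's own statement) =====
-- stated objective: faster
-- what changed: Replaces A's string-based binary counter (four helpers doing string-to-int conversion, string increment and character-padding loops, re-run for every codeword) with a single integer counter value/width maintained by shifts, bit_length and format(), so each step is O(1) big-int work instead of re-scanning and rebuilding the codeword string.
import Mathlib
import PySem

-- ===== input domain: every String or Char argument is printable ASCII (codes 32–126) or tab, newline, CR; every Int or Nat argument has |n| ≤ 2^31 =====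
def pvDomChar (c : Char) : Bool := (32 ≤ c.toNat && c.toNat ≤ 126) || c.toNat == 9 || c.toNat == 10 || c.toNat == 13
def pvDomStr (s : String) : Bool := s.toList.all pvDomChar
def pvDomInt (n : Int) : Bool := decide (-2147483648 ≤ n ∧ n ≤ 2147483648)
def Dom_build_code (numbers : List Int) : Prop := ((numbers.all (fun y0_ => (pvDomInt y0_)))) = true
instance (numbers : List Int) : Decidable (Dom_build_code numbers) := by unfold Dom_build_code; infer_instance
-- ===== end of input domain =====

-- B replaces A's string-based binary counter (four string helpers with padding/increment
-- loops) by a single integer counter value/width; measurably faster in a timing run.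

-- ===== PORT A =====

-- binary digits (MSB first) of a Nat; [] for 0 (shared digit helper for "{0:b}" / format(_, 'b'))
def binChars : Nat → List Char
  | 0 => []
  | n + 1 => binChars ((n + 1) / 2) ++ [if (n + 1) % 2 = 1 then '1' else '0']
decreasing_by exact Nat.div_lt_self (Nat.succ_pos n) (by omega)

-- "{0:b}".format(dec) — exact for every int (negatives get a '-' prefix, as in Python)
def decimal_to_binary (dec : Int) : List Char :=
  if dec < 0 then '-' :: binChars (-dec).toNat
  else if dec = 0 then ['0'] else binChars dec.toNat

-- the index length-1-i is always in range, so binary[index] is pyGetD under that fact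
def binary_to_decimal (binary : List Char) : Int :=
  let length : Int := binary.length
  (PySem.List.pyRange 0 length 1).foldl (fun decimal i =>
    let index := length - 1 - i
    if PySem.List.pyGetD binary index ' ' = '1' then decimal + 2 ^ i.toNat else decimal) 0

def increment_binary (binary : List Char) : List Char :=
  decimal_to_binary (binary_to_decimal binary + 1)

def build_word (code_word : List Char) (length : Int) : List Char :=
  if (code_word.length : Int) < length then build_word (code_word ++ ['0']) length
  else code_word
termination_by (length - code_word.length).toNat
decreasing_by simp at *; omega

-- the 'while len(binary) < len(prev_code)' left-padding loop of increment_code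
def pad_binary (binary : List Char) (plen : Nat) : List Char :=
  if binary.length < plen then pad_binary ('0' :: binary) plen else binary
termination_by plen - binary.length
decreasing_by simp at *; omega

def increment_code (prev_code : List Char) : List Char :=
  -- '1' not in prev_code : single-character substring test = character membership
  if PySem.Chars.isIn ['1'] prev_code = false then
    PySem.List.slice prev_code none (some ((prev_code.length : Int) - 1)) ++ ['1']
  else
    -- prev_code.index('1'): first occurrence of the character; it exists in this branch
    let idx := (PySem.List.index? prev_code '1').getD 0
    let binary := increment_binary (prev_code.drop idx)
    pad_binary binary prev_code.length

def build_code_step (st : List String × List Char) (length : Int) : List String × List Char :=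
  let code := build_word st.2 length
  (st.1 ++ [String.ofList code], increment_code code)

def build_code (numbers : List Int) : List String :=
  ((PySem.List.sorted numbers (fun x => x) false).foldl build_code_step ([], ['0'])).1

-- ===== PORT B =====

-- format(value, '0{width}b') — exact for value ≥ 0 (the counter is never negative)
def fmtBin (value width : Int) : List Char :=
  let bs := if value = 0 then ['0'] else binChars value.toNat
  List.replicate (width - bs.length).toNat '0' ++ bs

def build_code_alt_step (st : List String × Int × Int) (length : Int) : List String × Int × Int :=
  match st with
  | (res, value₀, width₀) =>
    let vw := if width₀ < length then (value₀ <<< (length - width₀).toNat, length)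
              else (value₀, width₀)
    let res := res ++ [String.ofList (fmtBin vw.1 vw.2)]
    let value := vw.1 + 1
    let width := if (PySem.Int.bitLength value : Int) > vw.2 then (PySem.Int.bitLength value : Int)
                 else vw.2
    (res, value, width)

def build_code_alt (numbers : List Int) : List String :=
  ((PySem.List.sorted numbers (fun x => x) false).foldl build_code_alt_step ([], 0, 1)).1

-- ===== PRECONDITION & SPEC =====
def Spec_build_code (numbers : List Int) (out : List String) : Prop := out = build_code_alt numbers
instance (numbers : List Int) (out : List String) : Decidable (Spec_build_code numbers out) := by unfold Spec_build_code; infer_instance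

-- ===== CLAIM (what is proved, stated in full; the proofs are below) =====
def Claim_equal_build_code : Prop := ∀ (numbers : List Int), Dom_build_code numbers → Spec_build_code numbers (build_code numbers)

-- ===== LEMMAS AND PROOFS =====

-- the "normalized binary word": digits of v, at least one digit
def nb (v : Nat) : List Char := if v = 0 then ['0'] else binChars v

-- v rendered with (at least) w digits: the shape of every code word of both programs
def enc (v w : Nat) : List Char := List.replicate (w - (nb v).length) '0' ++ nb v

-- little-endian-by-fold numeric value of a binary word
def chVal (c : Char) : Nat := if c = '1' then 1 else 0
def val (cs : List Char) : Nat := cs.foldl (fun a c => 2 * a + chVal c) 0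

lemma binChars_pos {n : Nat} (h : 0 < n) :
    binChars n = binChars (n / 2) ++ [if n % 2 = 1 then '1' else '0'] := by
  cases n with
  | zero => omega
  | succ m => rw [binChars]

lemma len_binChars (n : Nat) : (binChars n).length = PySem.Int.bitLength (n : Int) := by
  induction n using Nat.strong_induction_on with
  | _ n ih =>
    cases n with
    | zero => simp [binChars]
    | succ m =>
      rw [binChars_pos (Nat.succ_pos m), PySem.Int.bitLength_natCast (Nat.succ_pos m)]
      simp [ih ((m + 1) / 2) (by omega)]


lemma binChars_head {n : Nat} (h : 0 < n) : ∃ t, binChars n = '1' :: t := by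
  induction n using Nat.strong_induction_on with
  | _ n ih =>
    rw [binChars_pos h]
    by_cases h2 : n / 2 = 0
    · have hn1 : n = 1 := by omega
      subst hn1
      exact ⟨[], by simp [binChars]⟩
    · obtain ⟨t, ht⟩ := ih (n / 2) (Nat.div_lt_self h (by omega)) (by omega)
      exact ⟨t ++ [if n % 2 = 1 then '1' else '0'], by simp [ht]⟩


lemma val_binChars (n : Nat) : val (binChars n) = n := by
  induction n using Nat.strong_induction_on with
  | _ n ih =>
    cases Nat.eq_zero_or_pos n with
    | inl h0 => simp [h0, binChars, val]
    | inr hp =>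
      rw [binChars_pos hp]
      have hrec := ih (n / 2) (Nat.div_lt_self hp (by omega))
      have hval : ∀ (xs : List Char) (c : Char), val (xs ++ [c]) = 2 * val xs + chVal c := by
        intro xs c
        simp [val, List.foldl_append]
      rw [hval, hrec]
      rcases Nat.mod_two_eq_zero_or_one n with h2 | h2 <;> simp [h2, chVal] <;> omega


lemma val_foldl (cs : List Char) : ∀ a : Nat,
    cs.foldl (fun a c => 2 * a + chVal c) a = a * 2 ^ cs.length + val cs := by
  induction cs with
  | nil => intro a; simp [val]
  | cons c cs ih =>
    intro a
    have hv : val (c :: cs) = chVal c * 2 ^ cs.length + val cs := by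
      show List.foldl _ (2 * 0 + chVal c) cs = _
      rw [ih]
      ring_nf
    simp only [List.foldl_cons, ih, hv, List.length_cons]
    ring

lemma pyGetD_cons_succ (c : Char) (cs : List Char) (j : Int) (hj : 0 ≤ j) (d : Char) :
    PySem.List.pyGetD (c :: cs) (j + 1) d = PySem.List.pyGetD cs j d := by
  obtain ⟨m, rfl⟩ := Int.eq_ofNat_of_zero_le hj
  have : ((m : Int) + 1) = ((m + 1 : Nat) : Int) := by push_cast; ring
  rw [this, PySem.List.pyGetD_natCast, PySem.List.pyGetD_natCast]
  simp

lemma b2d_eq_val (cs : List Char) : binary_to_decimal cs = (val cs : Int) := by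
  induction cs with
  | nil => simp [binary_to_decimal, val, PySem.List.pyRange_one_eq_nil]
  | cons c cs ih =>
    simp only [binary_to_decimal, List.length_cons] at *
    have hcast : ((cs.length + 1 : Nat) : Int) = (cs.length : Int) + 1 := by push_cast; ring
    simp only [hcast]
    rw [PySem.List.pyRange_one_succ_right (by positivity), List.foldl_append]
    have hinner : (PySem.List.pyRange 0 (cs.length : Int) 1).foldl
        (fun (decimal : Int) (i : Int) => if PySem.List.pyGetD (c :: cs) ((cs.length : Int) + 1 - 1 - i) ' ' = '1'
          then decimal + 2 ^ i.toNat else decimal) (0 : Int)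
      = (PySem.List.pyRange 0 (cs.length : Int) 1).foldl
        (fun (decimal : Int) (i : Int) => if PySem.List.pyGetD cs ((cs.length : Int) - 1 - i) ' ' = '1'
          then decimal + 2 ^ i.toNat else decimal) (0 : Int) := by
      apply PySem.List.foldl_congr_mem
      intro acc i hi
      rw [PySem.List.mem_pyRange_one] at hi
      have h1 : (cs.length : Int) + 1 - 1 - i = ((cs.length : Int) - 1 - i) + 1 := by ring
      rw [h1, pyGetD_cons_succ _ _ _ (by omega)]
    simp only [List.foldl_cons, List.foldl_nil]
    rw [hinner, ih]
    have h0 : (cs.length : Int) + 1 - 1 - (cs.length : Int) = 0 := by ring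
    rw [h0, PySem.List.pyGetD_zero_cons]
    have hv : val (c :: cs) = chVal c * 2 ^ cs.length + val cs := by
      show List.foldl _ (2 * 0 + chVal c) cs = _
      rw [val_foldl]
      ring_nf
    rw [hv]
    by_cases hc : c = '1'
    · simp [hc, chVal]
      ring
    · simp [hc, chVal]

lemma build_word_eq (cs : List Char) (length : Int) :
    build_word cs length = cs ++ List.replicate (length - cs.length).toNat '0' := by
  by_cases h : (cs.length : Int) < length
  · rw [build_word, if_pos h, build_word_eq (cs ++ ['0']) length]
    have hk : (length - (cs.length : Int)).toNat
        = (length - ((cs ++ ['0']).length : Int)).toNat + 1 := by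
      simp; omega
    rw [hk, List.replicate_succ]
    simp
  · rw [build_word, if_neg h]
    have : (length - (cs.length : Int)).toNat = 0 := by omega
    simp [this]
termination_by (length - cs.length).toNat
decreasing_by simp at *; omega


lemma pad_binary_eq (bs : List Char) (p : Nat) :
    pad_binary bs p = List.replicate (p - bs.length) '0' ++ bs := by
  by_cases h : bs.length < p
  · rw [pad_binary, if_pos h, pad_binary_eq ('0' :: bs) p]
    have hk : p - bs.length = (p - ('0' :: bs).length) + 1 := by simp; omega
    rw [hk, List.replicate_succ']
    simp
  · rw [pad_binary, if_neg h]
    have : p - bs.length = 0 := by omega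
    simp [this]
termination_by p - bs.length
decreasing_by simp at *; omega


lemma binChars_mul_pow {v : Nat} (hv : 0 < v) (k : Nat) :
    binChars (v * 2 ^ k) = binChars v ++ List.replicate k '0' := by
  induction k with
  | zero => simp
  | succ k ih =>
    have he : v * 2 ^ (k + 1) = v * 2 ^ k * 2 := by ring
    have hdiv : v * 2 ^ k * 2 / 2 = v * 2 ^ k := by omega
    have hmod : v * 2 ^ k * 2 % 2 = 0 := by omega
    rw [he, binChars_pos (show 0 < v * 2 ^ k * 2 by positivity), hdiv, ih]
    simp [hmod, ← List.replicate_succ']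


lemma enc_append_zeros (v w k : Nat) (h : (nb v).length ≤ w) :
    enc v w ++ List.replicate k '0' = enc (v * 2 ^ k) (w + k) := by
  by_cases hv : v = 0
  · subst hv
    have hnb : nb 0 = ['0'] := rfl
    have h1 : 1 ≤ w := by simp [hnb] at h; omega
    have hz : (0 : Nat) * 2 ^ k = 0 := by ring
    rw [hz]
    simp only [enc, hnb, List.length_singleton]
    rw [List.append_assoc, List.singleton_append, ← List.replicate_succ,
      ← List.replicate_add, ← List.replicate_succ']
    congr 1
    omega
  · have hp : 0 < v := Nat.pos_of_ne_zero hv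
    have hp2 : v * 2 ^ k ≠ 0 := by positivity
    have hL : (nb v).length ≤ w := h
    simp only [enc, nb, if_neg hv, if_neg hp2, binChars_mul_pow hp k]
    rw [List.append_assoc]
    congr 1
    simp only [List.length_append, List.length_replicate]
    congr 1
    simp only [nb, if_neg hv] at hL
    omega


lemma length_enc (v w : Nat) (h : (nb v).length ≤ w) : (enc v w).length = w := by
  simp only [enc, List.length_append, List.length_replicate]
  omega


lemma index?_zeros_one (k : Nat) (t : List Char) :
    PySem.List.index? (List.replicate k '0' ++ '1' :: t) '1' = some k := by
  induction k with
  | zero => rw [List.replicate_zero, List.nil_append, PySem.List.index?_cons_self]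
  | succ k ih =>
    rw [List.replicate_succ, List.cons_append,
      PySem.List.index?_cons_of_ne _ (by decide : ('0' : Char) ≠ '1'), ih]
    rfl

lemma nb_one : nb 1 = ['1'] := by
  rw [nb, if_neg one_ne_zero, binChars_pos Nat.one_pos]
  norm_num
  rw [binChars]

lemma increment_code_enc (v w : Nat) (h : (nb v).length ≤ w) :
    increment_code (enc v w) = enc (v + 1) (max w (nb (v + 1)).length) := by
  by_cases hv : v = 0
  · subst hv
    have h1 : 1 ≤ w := by simpa [nb] using h
    have hnb0 : nb 0 = ['0'] := rfl
    have hlen1 : (['0'] : List Char).length = 1 := rfl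
    have henc : enc 0 w = List.replicate w '0' := by
      rw [enc, hnb0, hlen1, ← List.replicate_succ']
      congr 1
      omega
    have hno : PySem.Chars.isIn ['1'] (List.replicate w '0') = false := by
      rw [PySem.Chars.isIn_eq_false_iff, List.singleton_infix_iff]
      simp
    rw [henc, increment_code, if_pos hno]
    simp only [List.length_replicate]
    have hslice : PySem.List.slice (List.replicate w '0') none (some ((w : Int) - 1))
        = List.replicate (w - 1) '0' := by
      have hcast : ((w : Int) - 1) = ((w - 1 : Nat) : Int) := by omega
      rw [hcast, PySem.List.slice_to_natCast, List.take_replicate]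
      congr 1
      omega
    rw [hslice]
    have hrhs : enc (0 + 1) (max w (nb (0 + 1)).length)
        = List.replicate (w - 1) '0' ++ ['1'] := by
      rw [show (0 + 1 : Nat) = 1 from rfl, enc, nb_one,
        show (['1'] : List Char).length = 1 from rfl, Nat.max_eq_left h1]
    rw [hrhs]
  · have hp : 0 < v := Nat.pos_of_ne_zero hv
    obtain ⟨t, ht⟩ := binChars_head hp
    have hnbv : nb v = binChars v := by rw [nb, if_neg hv]
    have hLw : (binChars v).length ≤ w := by rwa [hnbv] at h
    have henc : enc v w = List.replicate (w - (binChars v).length) '0' ++ binChars v := by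
      rw [enc, hnbv]
    have hyes : ¬ (PySem.Chars.isIn ['1']
        (List.replicate (w - (binChars v).length) '0' ++ binChars v) = false) := by
      have : PySem.Chars.isIn ['1']
          (List.replicate (w - (binChars v).length) '0' ++ binChars v) = true := by
        rw [PySem.Chars.isIn_iff_infix, List.singleton_infix_iff, ht]
        simp
      simp [this]
    rw [henc, increment_code, if_neg hyes]
    rw [ht, index?_zeros_one]
    simp only [Option.getD_some]
    have hdrop : (List.replicate (w - ('1' :: t).length) '0' ++ '1' :: t).drop
        (w - ('1' :: t).length) = '1' :: t := by simp
    rw [hdrop]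
    rw [← ht, increment_binary, b2d_eq_val, val_binChars]
    have hcast : ((v : Int) + 1) = ((v + 1 : Nat) : Int) := by push_cast; ring
    have hd2b : decimal_to_binary ((v + 1 : Nat) : Int) = binChars (v + 1) := by
      rw [decimal_to_binary, if_neg (by omega), if_neg (by exact_mod_cast Nat.succ_ne_zero v)]
      simp
    rw [hcast, hd2b, pad_binary_eq]
    have hnb1 : nb (v + 1) = binChars (v + 1) := by rw [nb, if_neg (Nat.succ_ne_zero v)]
    rw [enc, hnb1]
    congr 1
    congr 1
    have hlt : ('1' :: t).length = (binChars v).length := by rw [ht]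
    simp only [List.length_append, List.length_replicate]
    omega

lemma fmtBin_cast (v w : Nat) :
    fmtBin (v : Int) (w : Int) = enc v w := by
  by_cases h : v = 0
  · subst h
    simp only [fmtBin, enc, nb]
    norm_num
  · simp [fmtBin, enc, nb, h]


lemma nb_len_mul_pow (v k : Nat) : (nb (v * 2 ^ k)).length ≤ (nb v).length + k := by
  by_cases hv : v = 0
  · subst hv
    simp [nb]
  · have hp := Nat.pos_of_ne_zero hv
    have h2 : v * 2 ^ k ≠ 0 := by positivity
    rw [nb, if_neg h2, nb, if_neg hv, binChars_mul_pow hp]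
    simp

lemma loop_eq (l : List Int) (res : List String) (v w : Nat) (h : (nb v).length ≤ w) :
    (l.foldl build_code_step (res, enc v w)).1
      = (l.foldl build_code_alt_step (res, (v : Int), (w : Int))).1 := by
  induction l generalizing res v w with
  | nil => rfl
  | cons length l ih =>
    simp only [List.foldl_cons]
    set K := (length - (w : Int)).toNat with hK
    have hbw : build_word (enc v w) length = enc (v * 2 ^ K) (w + K) := by
      rw [build_word_eq,
        show ((enc v w).length : Int) = (w : Int) by rw [length_enc v w h]]
      exact enc_append_zeros v w K h
    have hinv' : (nb (v * 2 ^ K)).length ≤ w + K :=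
      le_trans (nb_len_mul_pow v K) (by omega)
    have hbl : PySem.Int.bitLength ((v * 2 ^ K + 1 : Nat) : Int)
        = (nb (v * 2 ^ K + 1)).length := by
      rw [nb, if_neg (Nat.succ_ne_zero _), len_binChars]
    have hA : build_code_step (res, enc v w) length
        = (res ++ [String.ofList (enc (v * 2 ^ K) (w + K))],
           enc (v * 2 ^ K + 1) (max (w + K) (nb (v * 2 ^ K + 1)).length)) := by
      simp only [build_code_step]
      rw [hbw, increment_code_enc _ _ hinv']
    have hmax : (if ((nb (v * 2 ^ K + 1)).length : Int) > ((w + K : Nat) : Int)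
          then ((nb (v * 2 ^ K + 1)).length : Int) else ((w + K : Nat) : Int))
        = ((max (w + K) (nb (v * 2 ^ K + 1)).length : Nat) : Int) := by
      split_ifs with hgt <;> push_cast at hgt ⊢ <;> omega
    have hplus : ((v * 2 ^ K : Nat) : Int) + 1 = ((v * 2 ^ K + 1 : Nat) : Int) := by
      push_cast
      ring
    have hB : build_code_alt_step (res, (v : Int), (w : Int)) length
        = (res ++ [String.ofList (fmtBin ((v * 2 ^ K : Nat) : Int) ((w + K : Nat) : Int))],
           ((v * 2 ^ K + 1 : Nat) : Int),
           ((max (w + K) (nb (v * 2 ^ K + 1)).length : Nat) : Int)) := by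
      simp only [build_code_alt_step]
      by_cases hlt : (w : Int) < length
      · have hval : ((v : Nat) : Int) <<< (length - (w : Int)).toNat
            = ((v * 2 ^ K : Nat) : Int) := by
          rw [Int.shiftLeft_eq, ← hK]
          push_cast
          ring
        have hwid : length = ((w + K : Nat) : Int) := by
          push_cast
          omega
        rw [if_pos hlt, hval, hwid, hplus, hbl, hmax]
      · have hK0 : K = 0 := by omega
        simp only [hK0, pow_zero, Nat.mul_one, Nat.add_zero]
        rw [if_neg hlt]
        have h1 : ((v : Int)) + 1 = ((v + 1 : Nat) : Int) := by
          push_cast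
          ring
        rw [h1]
        have hbl' : PySem.Int.bitLength ((v + 1 : Nat) : Int) = (nb (v + 1)).length := by
          rw [nb, if_neg (Nat.succ_ne_zero _), len_binChars]
        rw [hbl']
        have hmax' : (if ((nb (v + 1)).length : Int) > (w : Int)
              then ((nb (v + 1)).length : Int) else (w : Int))
            = ((max w (nb (v + 1)).length : Nat) : Int) := by
          split_ifs with hgt <;> push_cast at hgt ⊢ <;> omega
        rw [hmax']
    rw [hA, hB, fmtBin_cast]
    exact ih _ _ _ (le_max_right _ _)

-- ===== VERDICT (by name: the statement is the Claim_ definition above) =====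
theorem build_code_spec : Claim_equal_build_code := by
  intro numbers _
  unfold Spec_build_code build_code build_code_alt
  have h := loop_eq (PySem.List.sorted numbers (fun x => x) false) [] 0 1 (by simp [nb])
  simpa [enc, nb] using h
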